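-- pv_equiv track=rewrite | github.com/EdsonEddy/scsc | notebooks/datasets/large/706716.py | calcular_suma
-- ===== SOURCE A (Python) =====
-- def calcular_suma(n):
--     suma_anterior = 1  # Iniciamos con la primera suma
--     cubo_anterior = 1  # El primer cubo es 1 (1^3)
--
--     for i in range(1, n):
--         cubo_actual = (i + 1) ** 3  # Calculamos el siguiente cubo
--         suma_anterior = cubo_anterior  # La suma anterior es el cubo del paso anterior
--         cubo_anterior = cubo_actual  # Actualizamos el cubo anterior
--
--     return suma_anterior, cubo_anterior
-- ===== SOURCE B (Python) =====
-- def calcular_suma(n):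
--     # closed form: after the loop, suma = (n-1)^3 and cubo = n^3 (for n >= 2)
--     if n <= 1:
--         return 1, 1
--     return (n - 1) ** 3, n ** 3
-- ===== Notes on version B (the rewrite author's own statement) =====
-- stated objective: faster
-- what changed: Replaced the O(n) loop that shifts cube values with the closed form ((n-1)^3, n^3) (and (1,1) for n<=1).
import Mathlib
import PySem

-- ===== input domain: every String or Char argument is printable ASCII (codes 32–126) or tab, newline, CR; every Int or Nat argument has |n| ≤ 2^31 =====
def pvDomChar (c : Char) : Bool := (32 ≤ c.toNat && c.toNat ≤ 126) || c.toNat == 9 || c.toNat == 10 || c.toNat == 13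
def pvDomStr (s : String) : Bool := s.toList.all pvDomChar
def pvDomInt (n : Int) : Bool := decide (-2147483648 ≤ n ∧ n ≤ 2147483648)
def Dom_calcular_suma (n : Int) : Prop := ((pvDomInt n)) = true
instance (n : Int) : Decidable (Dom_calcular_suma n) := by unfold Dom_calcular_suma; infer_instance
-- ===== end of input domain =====

-- ===== PORT A =====
-- Header: B replaces A's O(n) cube-shifting loop by the closed form ((n-1)^3, n^3); faster (asymptotic).
def calcular_suma (n : Int) : List Int :=
  let st := (PySem.List.pyRange 1 n 1).foldl
    (fun (acc : Int × Int) (i : Int) =>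
      let cubo_actual := (i + 1) ^ 3
      (acc.2, cubo_actual))
    (1, 1)
  [st.1, st.2]

-- ===== PORT B =====
def calcular_suma_alt (n : Int) : List Int :=
  if n ≤ 1 then [1, 1] else [(n - 1) ^ 3, n ^ 3]

-- ===== PRECONDITION & SPEC =====
def Spec_calcular_suma (n : Int) (out : List Int) : Prop := out = calcular_suma_alt n
instance (n : Int) (out : List Int) : Decidable (Spec_calcular_suma n out) := by unfold Spec_calcular_suma; infer_instance

-- ===== CLAIM (what is proved, stated in full; the proofs are below) =====
def Claim_equal_calcular_suma : Prop := ∀ (n : Int), Dom_calcular_suma n → Spec_calcular_suma n (calcular_suma n)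

-- ===== LEMMAS AND PROOFS =====
-- Loop characterisation: folding from 1 up to k+2 leaves ((k+1)^3, (k+2)^3).
theorem pv_fold_char (k : Nat) :
    (PySem.List.pyRange 1 ((k : Int) + 2) 1).foldl
      (fun (acc : Int × Int) (i : Int) => (acc.2, (i + 1) ^ 3)) (1, 1)
      = (((k : Int) + 1) ^ 3, ((k : Int) + 2) ^ 3) := by
  induction k with
  | zero => decide
  | succ m ih =>
      have h : ((m : Int) + 1) + 2 = ((m : Int) + 2) + 1 := by ring
      push_cast
      rw [h, PySem.List.pyRange_one_succ_right (by omega), List.foldl_append, ih]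
      simp
      ring

-- ===== VERDICT (by name: the statement is the Claim_ definition above) =====
theorem calcular_suma_spec : Claim_equal_calcular_suma := by
  intro n _
  unfold Spec_calcular_suma calcular_suma calcular_suma_alt
  by_cases h : n ≤ 1
  · rw [PySem.List.pyRange_one_eq_nil h]
    simp [h]
  · have h2 : 2 ≤ n := by omega
    obtain ⟨k, hk⟩ : ∃ k : Nat, n = (k : Int) + 2 :=
      ⟨(n - 2).toNat, by omega⟩
    subst hk
    rw [show ((fun (acc : Int × Int) (i : Int) =>
          let cubo_actual := (i + 1) ^ 3
          (acc.2, cubo_actual)) =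
        fun (acc : Int × Int) (i : Int) => (acc.2, (i + 1) ^ 3)) from rfl]
    rw [pv_fold_char k]
    simp [h]
    ring
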